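-- pv_equiv track=rewrite | github.com/csci595-research-lit-spring-2024/595-class-project-spring-2024-Mokshithy | src/src/responses/7/q_1042_flowerPlantingWithNoAdjacent.py | gardenNoAdj
-- ===== SOURCE A (Python) =====
-- from typing import List
--
-- def gardenNoAdj(n: int, paths: List[List[int]]) -> List[int]:
--     graph = [[] for _ in range(n)]
--     for x, y in paths:
--         graph[x - 1].append(y)
--         graph[y - 1].append(x)
--
--     result = [0] * n
--     for i in range(n):
--         neighbors_colors = set()
--         for neighbor in graph[i]:
--             neighbors_colors.add(result[neighbor - 1])
--         for color in range(1, 5):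
--             if color not in neighbors_colors:
--                 result[i] = color
--                 break
--     return result
-- ===== SOURCE B (Python) =====
-- from typing import List
--
-- def gardenNoAdj(n: int, paths: List[List[int]]) -> List[int]:
--     graph = [[] for _ in range(n)]
--     for x, y in paths:
--         graph[x - 1].append(y)
--         graph[y - 1].append(x)
--
--     # Propagate constraints forward: when a garden is colored, push that color
--     # into each neighbour's forbidden set; a garden's color is then simply the
--     # smallest of 1..4 not yet forbidden (0 if none is available).
--     forbidden = [set() for _ in range(n)]
--     result = [0] * n
--     for i in range(n):
--         color = next((c for c in range(1, 5) if c not in forbidden[i]), 0)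
--         result[i] = color
--         for neighbor in graph[i]:
--             forbidden[neighbor - 1].add(color)
--     return result
-- ===== Notes on version B (the rewrite author's own statement) =====
-- stated objective: alternative
-- what changed: B inverts A's coloring pass: instead of collecting the colors already assigned to a garden's neighbours at its turn (backward pull over result), B maintains per-garden forbidden-color sets and, as soon as a garden is colored, pushes that color forward into each neighbour's forbidden set, so a garden's color is read off its own forbidden set.
import Mathlib
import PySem

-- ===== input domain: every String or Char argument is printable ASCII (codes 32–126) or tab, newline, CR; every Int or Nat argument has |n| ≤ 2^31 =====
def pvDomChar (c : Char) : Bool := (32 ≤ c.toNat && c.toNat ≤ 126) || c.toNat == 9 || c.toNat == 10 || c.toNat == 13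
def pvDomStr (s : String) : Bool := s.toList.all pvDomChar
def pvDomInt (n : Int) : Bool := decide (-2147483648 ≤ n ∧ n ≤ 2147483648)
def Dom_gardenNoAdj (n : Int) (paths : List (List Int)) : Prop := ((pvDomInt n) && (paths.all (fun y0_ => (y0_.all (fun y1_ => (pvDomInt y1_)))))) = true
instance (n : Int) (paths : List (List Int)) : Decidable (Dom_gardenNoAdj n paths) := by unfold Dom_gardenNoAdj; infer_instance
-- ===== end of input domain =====

-- B keeps the adjacency build but inverts the coloring pass: instead of collecting
-- the already-assigned colors of each garden's neighbours, it pushes each chosen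
-- color forward into the neighbours' forbidden sets (objective: alternative).

-- ===== PORT A =====
-- graph[i].append(v)  (Python list index, negative from the end; no-op outside Pre_ where Python raises)
def pvAppendAt (g : List (List Int)) (i : Int) (v : Int) : List (List Int) :=
  PySem.List.pySetD g i (PySem.List.pyGetD g i [] ++ [v])

-- for x, y in paths: graph[x-1].append(y); graph[y-1].append(x)   (a non-pair raises in Python: outside Pre_)
def pvBuildStep (g : List (List Int)) (p : List Int) : List (List Int) :=
  match p with
  | [x, y] => pvAppendAt (pvAppendAt g (x - 1) y) (y - 1) x
  | _ => g

def pvBuildGraph (n : Int) (paths : List (List Int)) : List (List Int) :=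
  paths.foldl pvBuildStep (List.replicate n.toNat [])

-- body of A's 'for i in range(n)' loop
def pvStepA (graph : List (List Int)) (result : List Int) (i : Int) : List Int :=
  let ncolors : PySem.Set Int := (PySem.List.pyGetD graph i []).foldl
      (fun s nb => PySem.Set.add s (PySem.List.pyGetD result (nb - 1) 0)) PySem.Set.empty
  match [(1 : Int), 2, 3, 4].find? (fun c => !(PySem.Set.contains ncolors c)) with
  | some c => PySem.List.pySetD result i c
  | none => result

def gardenNoAdj (n : Int) (paths : List (List Int)) : List Int :=
  (PySem.List.pyRange 0 n 1).foldl (pvStepA (pvBuildGraph n paths)) (List.replicate n.toNat 0)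

-- ===== PORT B =====
-- forbidden[neighbor - 1].add(color)  (Python list index, negative from the end)
def pvPush (color : Int) (f : List (PySem.Set Int)) (nb : Int) : List (PySem.Set Int) :=
  PySem.List.pySetD f (nb - 1)
    (PySem.Set.add (PySem.List.pyGetD f (nb - 1) PySem.Set.empty) color)

-- body of B's 'for i in range(n)' loop over the state (forbidden, result)
def pvStepB (graph : List (List Int)) (st : List (PySem.Set Int) × List Int) (i : Int) :
    List (PySem.Set Int) × List Int :=
  let color := (([(1 : Int), 2, 3, 4]).find?
      (fun c => !(PySem.Set.contains (PySem.List.pyGetD st.1 i PySem.Set.empty) c))).getD 0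
  let res := PySem.List.pySetD st.2 i color
  let forb := (PySem.List.pyGetD graph i []).foldl (pvPush color) st.1
  (forb, res)

def gardenNoAdj_alt (n : Int) (paths : List (List Int)) : List Int :=
  ((PySem.List.pyRange 0 n 1).foldl (pvStepB (pvBuildGraph n paths))
    (List.replicate n.toNat PySem.Set.empty, List.replicate n.toNat 0)).2

-- ===== PRECONDITION & SPEC =====
-- Exactly the inputs on which A returns: every path is a pair of garden labels x
-- with -n < x ≤ n (Python's negative list indexing accepts x-1 ≥ -n; anything else
-- makes A raise IndexError / ValueError), and n ≥ 0 unless paths is empty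
-- (negative n with no paths returns [] in A).
def Pre_gardenNoAdj (n : Int) (paths : List (List Int)) : Prop :=
  (0 ≤ n ∨ paths = []) ∧ ∀ p ∈ paths, p.length = 2 ∧
    -n < p.getD 0 0 ∧ p.getD 0 0 ≤ n ∧ -n < p.getD 1 0 ∧ p.getD 1 0 ≤ n
instance (n : Int) (paths : List (List Int)) : Decidable (Pre_gardenNoAdj n paths) := by
  unfold Pre_gardenNoAdj; infer_instance

def pvWitness_gardenNoAdj : Int × List (List Int) := (3, [[1, 2], [2, 3]])

def Spec_gardenNoAdj (n : Int) (paths : List (List Int)) (out : List Int) : Prop := out = gardenNoAdj_alt n paths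
instance (n : Int) (paths : List (List Int)) (out : List Int) : Decidable (Spec_gardenNoAdj n paths out) := by unfold Spec_gardenNoAdj; infer_instance

-- ===== CLAIM (what is proved, stated in full; the proofs are below) =====
def Claim_equal_gardenNoAdj : Prop := ∀ (n : Int) (paths : List (List Int)), Dom_gardenNoAdj n paths → Pre_gardenNoAdj n paths → Spec_gardenNoAdj n paths (gardenNoAdj n paths)

-- ===== LEMMAS AND PROOFS =====

-- bounds and closed forms for Python-style (emod) index normalization
lemma pvEmodBounds (i len : Int) (h : 0 < len) : 0 ≤ i % len ∧ i % len < len :=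
  ⟨Int.emod_nonneg _ (by omega), Int.emod_lt_of_pos _ h⟩

lemma pvEmodNeg (i len : Int) (h1 : -len ≤ i) (h2 : i < 0) : i % len = i + len := by
  have h := Int.add_mul_emod_self_left (a := i) (b := len) (c := 1)
  rw [mul_one] at h
  rw [← h]
  exact Int.emod_eq_of_lt (by omega) (by omega)

-- shape form of the precondition
lemma pre_shape {n : Int} {paths : List (List Int)} (h : Pre_gardenNoAdj n paths)
    {p : List Int} (hp : p ∈ paths) :
    ∃ x y, p = [x, y] ∧ -n < x ∧ x ≤ n ∧ -n < y ∧ y ≤ n := by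
  obtain ⟨-, h2⟩ := h
  obtain ⟨hl, hx1, hx2, hy1, hy2⟩ := h2 p hp
  match p, hl with
  | [x, y], _ => exact ⟨x, y, rfl, by simpa using hx1, by simpa using hx2,
      by simpa using hy1, by simpa using hy2⟩

lemma pyGetD_emod {α : Type} (xs : List α) (i : Int) (d : α)
    (h1 : -(xs.length : Int) ≤ i) (h2 : i < xs.length) :
    PySem.List.pyGetD xs i d = xs.getD (i % (xs.length : Int)).toNat d := by
  have hidx : PySem.List.pyIdx? xs.length i = some ((i % (xs.length : Int)).toNat) := by
    by_cases h : 0 ≤ i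
    · have he : i % (xs.length : Int) = i := Int.emod_eq_of_lt h h2
      simp only [PySem.List.pyIdx?, if_pos h, if_pos h2, he]
    · have he : i % (xs.length : Int) = i + xs.length := pvEmodNeg _ _ h1 (by omega)
      simp only [PySem.List.pyIdx?, if_neg h, if_pos h1, he]
      congr 1
      omega
  simp [PySem.List.pyGetD, PySem.List.pyGet?, hidx, List.getD]

lemma pySetD_emod {α : Type} (xs : List α) (i : Int) (v : α)
    (h1 : -(xs.length : Int) ≤ i) (h2 : i < xs.length) :
    PySem.List.pySetD xs i v = xs.set (i % (xs.length : Int)).toNat v := by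
  have hidx : PySem.List.pyIdx? xs.length i = some ((i % (xs.length : Int)).toNat) := by
    by_cases h : 0 ≤ i
    · have he : i % (xs.length : Int) = i := Int.emod_eq_of_lt h h2
      simp only [PySem.List.pyIdx?, if_pos h, if_pos h2, he]
    · have he : i % (xs.length : Int) = i + xs.length := pvEmodNeg _ _ h1 (by omega)
      simp only [PySem.List.pyIdx?, if_neg h, if_pos h1, he]
      congr 1
      omega
  simp [PySem.List.pySetD, PySem.List.pySet?, hidx]

lemma length_pvAppendAt (g : List (List Int)) (i v : Int) :
    (pvAppendAt g i v).length = g.length := by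
  simp [pvAppendAt, PySem.List.length_pySetD]

lemma length_pvBuildStep (g : List (List Int)) (p : List Int) :
    (pvBuildStep g p).length = g.length := by
  match p with
  | [x, y] => simp [pvBuildStep, length_pvAppendAt]
  | [] => rfl
  | [_] => rfl
  | _ :: _ :: _ :: _ => rfl

lemma mem_pvAppendAt {n : Int} (g : List (List Int)) (idx w : Int) (i : Int) (v : Int)
    (hg : (g.length : Int) = n) (hidx1 : -n ≤ idx) (hidx2 : idx < n)
    (hi1 : 0 ≤ i) (hi2 : i < n) :
    v ∈ PySem.List.pyGetD (pvAppendAt g idx w) i [] ↔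
      (idx % n = i ∧ v = w) ∨ v ∈ PySem.List.pyGetD g i [] := by
  have hn : 0 < n := by omega
  have hb := pvEmodBounds idx n hn
  have hj : i % n = i := Int.emod_eq_of_lt hi1 hi2
  rw [pvAppendAt, pyGetD_emod g idx [] (by omega) (by omega),
      pySetD_emod _ _ _ (by omega) (by omega),
      pyGetD_emod _ i [] (by simp; omega) (by simp; omega),
      pyGetD_emod g i [] (by omega) (by omega)]
  simp only [List.length_set]
  rw [hg, hj]
  by_cases hcase : idx % n = i
  · rw [hcase]
    have hlt : i.toNat < g.length := by omega
    have hset : (g.set i.toNat (g.getD i.toNat [] ++ [w])).getD i.toNat [] =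
        g.getD i.toNat [] ++ [w] := by
      rw [List.getD_eq_getElem?_getD, List.getElem?_set_self (by omega),
          List.getD_eq_getElem?_getD]
      simp [List.getElem?_eq_getElem hlt]
    rw [hset]
    simp [List.mem_append]
    tauto
  · have hne : (idx % n).toNat ≠ i.toNat := by omega
    have hset : (g.set (idx % n).toNat (g.getD (idx % n).toNat [] ++ [w])).getD i.toNat [] =
        g.getD i.toNat [] := by
      rw [List.getD_eq_getElem?_getD, List.getElem?_set_ne hne, List.getD_eq_getElem?_getD]
    rw [hset]
    simp [hcase]

-- characterization of A's bucket i after the whole graph build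
lemma mem_buildFold {n : Int} (paths : List (List Int)) (g : List (List Int))
    (hsh : ∀ p ∈ paths, ∃ x y, p = [x, y] ∧ -n < x ∧ x ≤ n ∧ -n < y ∧ y ≤ n)
    (hg : (g.length : Int) = n) (i : Int) (hi1 : 0 ≤ i) (hi2 : i < n) (v : Int) :
    v ∈ PySem.List.pyGetD (paths.foldl pvBuildStep g) i [] ↔
      v ∈ PySem.List.pyGetD g i [] ∨
      ∃ p ∈ paths, ∃ x y, p = [x, y] ∧
        (((x - 1) % n = i ∧ v = y) ∨ ((y - 1) % n = i ∧ v = x)) := by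
  induction paths generalizing g with
  | nil => simp
  | cons p rest ih =>
    obtain ⟨x, y, rfl, hx1, hx2, hy1, hy2⟩ := hsh _ List.mem_cons_self
    have hg' : ((pvBuildStep g [x, y]).length : Int) = n := by
      rw [length_pvBuildStep]; exact hg
    rw [List.foldl_cons, ih (pvBuildStep g [x, y]) (fun q hq => hsh q (List.mem_cons_of_mem _ hq)) hg']
    have hstep : v ∈ PySem.List.pyGetD (pvBuildStep g [x, y]) i [] ↔
        (((x - 1) % n = i ∧ v = y) ∨ ((y - 1) % n = i ∧ v = x)) ∨
        v ∈ PySem.List.pyGetD g i [] := by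
      show v ∈ PySem.List.pyGetD (pvAppendAt (pvAppendAt g (x - 1) y) (y - 1) x) i [] ↔ _
      rw [mem_pvAppendAt _ _ _ _ _ (by rw [length_pvAppendAt]; exact hg) (by omega) (by omega) hi1 hi2,
          mem_pvAppendAt _ _ _ _ _ hg (by omega) (by omega) hi1 hi2]
      tauto
    rw [hstep]
    constructor
    · rintro (((h | h) | h) | h)
      · exact Or.inr ⟨[x, y], List.mem_cons_self, x, y, rfl, Or.inl h⟩
      · exact Or.inr ⟨[x, y], List.mem_cons_self, x, y, rfl, Or.inr h⟩
      · exact Or.inl h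
      · obtain ⟨q, hq, hrest⟩ := h
        exact Or.inr ⟨q, List.mem_cons_of_mem _ hq, hrest⟩
    · rintro (h | ⟨q, hq, x', y', rfl, hc⟩)
      · exact Or.inl (Or.inr h)
      · rcases List.mem_cons.mp hq with heq | hmem
        · obtain ⟨hx', hy'⟩ : x' = x ∧ y' = y := by
            have := heq; simp at this; tauto
          subst hx'; subst hy'
          exact Or.inl (Or.inl hc)
        · exact Or.inr ⟨[x', y'], hmem, x', y', rfl, hc⟩

-- membership in A's per-garden color set (generic fold of adds)
lemma mem_foldl_add (l : List Int) (f : Int → Int) (s : PySem.Set Int) (c : Int) :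
    c ∈ l.foldl (fun s nb => PySem.Set.add s (f nb)) s ↔ c ∈ s ∨ ∃ nb ∈ l, f nb = c := by
  induction l generalizing s with
  | nil => simp
  | cons a l ih =>
    rw [List.foldl_cons, ih]
    rw [PySem.Set.mem_add]
    constructor
    · rintro ((h | h) | ⟨nb, hnb, hf⟩)
      · exact Or.inl h
      · exact Or.inr ⟨a, List.mem_cons_self, h.symm⟩
      · exact Or.inr ⟨nb, List.mem_cons_of_mem _ hnb, hf⟩
    · rintro (h | ⟨nb, hnb, hf⟩)
      · exact Or.inl (Or.inl h)
      · rcases List.mem_cons.mp hnb with rfl | hmem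
        · exact Or.inl (Or.inr hf.symm)
        · exact Or.inr ⟨nb, hmem, hf⟩

-- the (normalized) adjacency relation the built graph realizes
def pvAdj (n : Int) (paths : List (List Int)) (i j : Int) : Prop :=
  ∃ p ∈ paths, ∃ x y, p = [x, y] ∧
    (((x - 1) % n = i ∧ (y - 1) % n = j) ∨ ((y - 1) % n = i ∧ (x - 1) % n = j))

lemma pvAdj_symm {n : Int} {paths : List (List Int)} {i j : Int} :
    pvAdj n paths i j ↔ pvAdj n paths j i := by
  constructor
  · rintro ⟨p, hp, x, y, rfl, (⟨h1, h2⟩ | ⟨h1, h2⟩)⟩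
    · exact ⟨_, hp, x, y, rfl, Or.inr ⟨h2, h1⟩⟩
    · exact ⟨_, hp, x, y, rfl, Or.inl ⟨h2, h1⟩⟩
  · rintro ⟨p, hp, x, y, rfl, (⟨h1, h2⟩ | ⟨h1, h2⟩)⟩
    · exact ⟨_, hp, x, y, rfl, Or.inr ⟨h2, h1⟩⟩
    · exact ⟨_, hp, x, y, rfl, Or.inl ⟨h2, h1⟩⟩

-- labels stored in a bucket come from paths, hence are in (-n, n]
lemma bucket_bounds {n : Int} {paths : List (List Int)}
    (hsh : ∀ p ∈ paths, ∃ x y, p = [x, y] ∧ -n < x ∧ x ≤ n ∧ -n < y ∧ y ≤ n)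
    {i : Int} (hi1 : 0 ≤ i) (hi2 : i < n) {v : Int}
    (hv : v ∈ PySem.List.pyGetD (pvBuildGraph n paths) i []) : -n < v ∧ v ≤ n := by
  rw [pvBuildGraph, mem_buildFold paths _ hsh (by simp; omega) i hi1 hi2] at hv
  rcases hv with h | ⟨p, hp, x, y, rfl, hc⟩
  · rw [pyGetD_emod _ _ _ (by simp; omega) (by simp; omega)] at h
    rw [List.getD_eq_getElem?_getD, List.getElem?_replicate] at h
    split at h <;> simp at h
  · obtain ⟨x', y', heq, hx1, hx2, hy1, hy2⟩ := hsh _ hp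
    obtain ⟨rfl, rfl⟩ : x' = x ∧ y' = y := by
      have := heq; simp at this; tauto
    rcases hc with ⟨-, rfl⟩ | ⟨-, rfl⟩ <;> constructor <;> omega

-- a bucket entry normalizing to slot k is exactly adjacency i ~ k
lemma bucket_adj {n : Int} {paths : List (List Int)}
    (hsh : ∀ p ∈ paths, ∃ x y, p = [x, y] ∧ -n < x ∧ x ≤ n ∧ -n < y ∧ y ≤ n)
    {i k : Int} (hi1 : 0 ≤ i) (hi2 : i < n) :
    (∃ nb ∈ PySem.List.pyGetD (pvBuildGraph n paths) i [], (nb - 1) % n = k) ↔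
      pvAdj n paths i k := by
  constructor
  · rintro ⟨nb, hnb, rfl⟩
    rw [pvBuildGraph, mem_buildFold paths _ hsh (by simp; omega) i hi1 hi2] at hnb
    rcases hnb with h | ⟨p, hp, x, y, rfl, hc⟩
    · rw [pyGetD_emod _ _ _ (by simp; omega) (by simp; omega)] at h
      rw [List.getD_eq_getElem?_getD, List.getElem?_replicate] at h
      split at h <;> simp at h
    · rcases hc with ⟨h1, rfl⟩ | ⟨h1, rfl⟩
      · exact ⟨_, hp, x, nb, rfl, Or.inl ⟨h1, rfl⟩⟩
      · exact ⟨_, hp, nb, y, rfl, Or.inr ⟨h1, rfl⟩⟩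
  · rintro ⟨p, hp, x, y, rfl, (⟨h1, h2⟩ | ⟨h1, h2⟩)⟩
    · refine ⟨y, ?_, h2⟩
      rw [pvBuildGraph, mem_buildFold paths _ hsh (by simp; omega) i hi1 hi2]
      exact Or.inr ⟨_, hp, x, y, rfl, Or.inl ⟨h1, rfl⟩⟩
    · refine ⟨x, ?_, h2⟩
      rw [pvBuildGraph, mem_buildFold paths _ hsh (by simp; omega) i hi1 hi2]
      exact Or.inr ⟨_, hp, x, y, rfl, Or.inr ⟨h1, rfl⟩⟩

-- membership in A's collected color set for garden i
lemma mem_usedA {n : Int} {paths : List (List Int)}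
    (hsh : ∀ p ∈ paths, ∃ x y, p = [x, y] ∧ -n < x ∧ x ≤ n ∧ -n < y ∧ y ≤ n)
    (r : List Int) (hr : (r.length : Int) = n) {i : Int} (hi1 : 0 ≤ i) (hi2 : i < n)
    (c : Int) :
    c ∈ (PySem.List.pyGetD (pvBuildGraph n paths) i []).foldl
        (fun s nb => PySem.Set.add s (PySem.List.pyGetD r (nb - 1) 0)) PySem.Set.empty ↔
      ∃ j : Int, 0 ≤ j ∧ j < n ∧ pvAdj n paths i j ∧ r.getD j.toNat 0 = c := by
  have hn : 0 < n := by omega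
  rw [mem_foldl_add]
  constructor
  · rintro (h | ⟨nb, hnb, hread⟩)
    · simp [PySem.Set.empty] at h
    · obtain ⟨hb1, hb2⟩ := bucket_bounds hsh hi1 hi2 hnb
      have hbnd := pvEmodBounds (nb - 1) n hn
      refine ⟨(nb - 1) % n, hbnd.1, hbnd.2, (bucket_adj hsh hi1 hi2).mp ⟨nb, hnb, rfl⟩, ?_⟩
      rw [pyGetD_emod r _ _ (by omega) (by omega), hr] at hread
      exact hread
  · rintro ⟨j, hj1, hj2, hadj, hread⟩
    obtain ⟨nb, hnb, hnorm⟩ := (bucket_adj hsh hi1 hi2).mpr hadj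
    obtain ⟨hb1, hb2⟩ := bucket_bounds hsh hi1 hi2 hnb
    right
    refine ⟨nb, hnb, ?_⟩
    rw [pyGetD_emod r _ _ (by omega) (by omega), hr, hnorm]
    exact hread

-- membership after one forbidden-set push
lemma mem_pvPush {n : Int} (f : List (PySem.Set Int)) (hf : (f.length : Int) = n)
    (col nb : Int) (hnb1 : -n < nb) (hnb2 : nb ≤ n) {k : Int} (hk1 : 0 ≤ k) (hk2 : k < n)
    (c : Int) :
    c ∈ PySem.List.pyGetD (pvPush col f nb) k PySem.Set.empty ↔
      ((nb - 1) % n = k ∧ c = col) ∨ c ∈ PySem.List.pyGetD f k PySem.Set.empty := by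
  have hn : 0 < n := by omega
  have hb := pvEmodBounds (nb - 1) n hn
  have hkk : k % n = k := Int.emod_eq_of_lt hk1 hk2
  rw [pvPush, pyGetD_emod f (nb - 1) _ (by omega) (by omega),
      pySetD_emod _ _ _ (by omega) (by omega),
      pyGetD_emod _ k _ (by simp; omega) (by simp; omega),
      pyGetD_emod f k _ (by omega) (by omega)]
  simp only [List.length_set]
  rw [hf, hkk]
  by_cases hcase : (nb - 1) % n = k
  · rw [hcase]
    have hlt : k.toNat < f.length := by omega
    have hset : (f.set k.toNat (PySem.Set.add (f.getD k.toNat PySem.Set.empty) col)).getD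
        k.toNat PySem.Set.empty = PySem.Set.add (f.getD k.toNat PySem.Set.empty) col := by
      rw [List.getD_eq_getElem?_getD, List.getElem?_set_self (by omega),
          List.getD_eq_getElem?_getD]
      simp [List.getElem?_eq_getElem hlt]
    rw [hset, PySem.Set.mem_add]
    tauto
  · have hne : ((nb - 1) % n).toNat ≠ k.toNat := by omega
    have hset : (f.set ((nb - 1) % n).toNat (PySem.Set.add (f.getD ((nb - 1) % n).toNat
        PySem.Set.empty) col)).getD k.toNat PySem.Set.empty =
        f.getD k.toNat PySem.Set.empty := by
      rw [List.getD_eq_getElem?_getD, List.getElem?_set_ne hne, List.getD_eq_getElem?_getD]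
    rw [hset]
    simp [hcase]

lemma length_pushFold (L : List Int) (col : Int) (f : List (PySem.Set Int)) :
    (L.foldl (pvPush col) f).length = f.length := by
  induction L generalizing f with
  | nil => rfl
  | cons a L ih => rw [List.foldl_cons, ih, pvPush, PySem.List.length_pySetD]

-- membership after pushing a color along a whole bucket
lemma mem_pushFold {n : Int} (L : List Int) (hL : ∀ v ∈ L, -n < v ∧ v ≤ n)
    (col : Int) (f : List (PySem.Set Int)) (hf : (f.length : Int) = n)
    {k : Int} (hk1 : 0 ≤ k) (hk2 : k < n) (c : Int) :
    c ∈ PySem.List.pyGetD (L.foldl (pvPush col) f) k PySem.Set.empty ↔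
      c ∈ PySem.List.pyGetD f k PySem.Set.empty ∨
      (c = col ∧ ∃ nb ∈ L, (nb - 1) % n = k) := by
  induction L generalizing f with
  | nil => simp
  | cons a L ih =>
    obtain ⟨ha1, ha2⟩ := hL a List.mem_cons_self
    have hf' : (((pvPush col f a).length : Int)) = n := by
      rw [pvPush, PySem.List.length_pySetD]; exact hf
    rw [List.foldl_cons, ih (fun v hv => hL v (List.mem_cons_of_mem _ hv)) _ hf',
        mem_pvPush f hf col a ha1 ha2 hk1 hk2]
    constructor
    · rintro ((⟨h1, h2⟩ | h) | ⟨h1, nb, hnb, h2⟩)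
      · exact Or.inr ⟨h2, a, List.mem_cons_self, h1⟩
      · exact Or.inl h
      · exact Or.inr ⟨h1, nb, List.mem_cons_of_mem _ hnb, h2⟩
    · rintro (h | ⟨h1, nb, hnb, h2⟩)
      · exact Or.inl (Or.inr h)
      · rcases List.mem_cons.mp hnb with rfl | hmem
        · exact Or.inl (Or.inl ⟨h2, h1⟩)
        · exact Or.inr ⟨h1, nb, hmem, h2⟩

-- booleans from equal memberships
lemma pvContains_congr (s t : PySem.Set Int) (c : Int) (h : c ∈ s ↔ c ∈ t) :
    PySem.Set.contains s c = PySem.Set.contains t c := by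
  by_cases hc : c ∈ t
  · simp [PySem.Set.contains, hc, h.mpr hc]
  · have hs : ¬ c ∈ s := fun hh => hc (h.mp hh)
    simp [PySem.Set.contains, hc, hs]

-- find? only looks at the candidates
lemma find?_congr_int (l : List Int) (p q : Int → Bool) (h : ∀ a ∈ l, p a = q a) :
    l.find? p = l.find? q := by
  induction l with
  | nil => rfl
  | cons a l ih =>
    rw [List.find?_cons, List.find?_cons, h a List.mem_cons_self]
    cases hq : q a with
    | true => rfl
    | false => exact ih (fun b hb => h b (List.mem_cons_of_mem _ hb))

-- B's loop invariant: slot k's forbidden set holds exactly the colors of the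
-- already-processed gardens adjacent to k
def pvInv (n : Int) (paths : List (List Int)) (i : Int)
    (f : List (PySem.Set Int)) (r : List Int) : Prop :=
  ∀ k : Int, 0 ≤ k → k < n → ∀ c : Int,
    (c ∈ PySem.List.pyGetD f k PySem.Set.empty ↔
      ∃ j : Int, 0 ≤ j ∧ j < i ∧ pvAdj n paths j k ∧ r.getD j.toNat 0 = c)

-- main loop: A's fold equals the second component of B's fold
lemma loop_eq {n : Int} (paths : List (List Int))
    (hsh : ∀ p ∈ paths, ∃ x y, p = [x, y] ∧ -n < x ∧ x ≤ n ∧ -n < y ∧ y ≤ n) :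
    ∀ (m : Nat) (j : Int) (r : List Int) (f : List (PySem.Set Int)),
    0 ≤ j → (n - j).toNat = m → (r.length : Int) = n → (f.length : Int) = n →
    (∀ k : Nat, j ≤ (k : Int) → (k : Int) < n → r.getD k 0 = 0) →
    pvInv n paths j f r →
    (PySem.List.pyRange j n 1).foldl (pvStepA (pvBuildGraph n paths)) r =
    ((PySem.List.pyRange j n 1).foldl (pvStepB (pvBuildGraph n paths)) (f, r)).2 := by
  intro m
  induction m with
  | zero =>
    intro j r f hj hm hr hf hz hinv
    rw [PySem.List.pyRange_one_eq_nil (by omega)]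
    rfl
  | succ m ih =>
    intro j r f hj hm hr hf hz hinv
    have hjn : j < n := by omega
    have hn : 0 < n := by omega
    rw [PySem.List.pyRange_one_cons hjn, List.foldl_cons, List.foldl_cons]
    -- the two find? calls agree
    have hfind : [(1 : Int), 2, 3, 4].find?
        (fun c => !(PySem.Set.contains ((PySem.List.pyGetD (pvBuildGraph n paths) j []).foldl
          (fun s nb => PySem.Set.add s (PySem.List.pyGetD r (nb - 1) 0)) PySem.Set.empty) c)) =
        [(1 : Int), 2, 3, 4].find?
        (fun c => !(PySem.Set.contains (PySem.List.pyGetD f j PySem.Set.empty) c)) := by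
      apply find?_congr_int
      intro c hc
      have hcmem : c ∈ (PySem.List.pyGetD (pvBuildGraph n paths) j []).foldl
          (fun s nb => PySem.Set.add s (PySem.List.pyGetD r (nb - 1) 0)) PySem.Set.empty ↔
          c ∈ PySem.List.pyGetD f j PySem.Set.empty := by
        rw [mem_usedA hsh r hr hj hjn c, hinv j hj hjn c]
        constructor
        · rintro ⟨jj, h1, h2, hadj, hread⟩
          have hc0 : c ≠ 0 := by fin_cases hc <;> omega
          have hlt : jj < j := by
            by_contra hge
            have h0 := hz jj.toNat (by omega) (by omega)
            rw [h0] at hread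
            exact hc0 hread.symm
          exact ⟨jj, h1, hlt, pvAdj_symm.mp hadj, hread⟩
        · rintro ⟨jj, h1, h2, hadj, hread⟩
          exact ⟨jj, h1, by omega, pvAdj_symm.mp hadj, hread⟩
      simp only [pvContains_congr _ _ _ hcmem]
    -- both steps produce the same result list
    set col := ([(1 : Int), 2, 3, 4].find?
        (fun c => !(PySem.Set.contains (PySem.List.pyGetD f j PySem.Set.empty) c))).getD 0 with hcol
    have hstepB1 : (pvStepB (pvBuildGraph n paths) (f, r) j).1 =
        (PySem.List.pyGetD (pvBuildGraph n paths) j []).foldl (pvPush col) f := rfl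
    have hstepB2 : (pvStepB (pvBuildGraph n paths) (f, r) j).2 =
        PySem.List.pySetD r j col := rfl
    have hsetr : PySem.List.pySetD r j col = r.set j.toNat col := by
      rw [pySetD_emod r j col (by omega) (by omega), hr, Int.emod_eq_of_lt hj hjn]
    have hstepA : pvStepA (pvBuildGraph n paths) r j = PySem.List.pySetD r j col := by
      rw [pvStepA]
      simp only [hfind]
      cases hfindc : [(1 : Int), 2, 3, 4].find?
          (fun c => !(PySem.Set.contains (PySem.List.pyGetD f j PySem.Set.empty) c)) with
      | some c =>
        simp only [hcol, hfindc, Option.getD_some]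
      | none =>
        have hcol0 : col = 0 := by rw [hcol, hfindc]; rfl
        have hset0 : r.set j.toNat col = r := by
          apply List.ext_getElem (by simp)
          intro k hk1 hk2
          by_cases hki : k = j.toNat
          · subst hki
            rw [List.getElem_set_self, hcol0]
            have h0 := hz j.toNat (by omega) (by omega)
            have hg1 : r[j.toNat]? = some r[j.toNat] := List.getElem?_eq_getElem (by omega)
            rw [List.getD_eq_getElem?_getD, hg1] at h0
            simpa using h0.symm
          · rw [List.getElem_set_ne (by omega)]
        show r = PySem.List.pySetD r j col
        rw [hsetr, hset0]
    rw [hstepA]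
    -- recurse with the updated state
    have hr' : (((PySem.List.pySetD r j col).length : Int)) = n := by
      rw [PySem.List.length_pySetD]; exact hr
    have hf' : ((((PySem.List.pyGetD (pvBuildGraph n paths) j []).foldl (pvPush col) f).length : Int)) = n := by
      rw [length_pushFold]; exact hf
    have hz' : ∀ k : Nat, j + 1 ≤ (k : Int) → (k : Int) < n →
        (PySem.List.pySetD r j col).getD k 0 = 0 := by
      intro k hk1 hk2
      rw [hsetr, List.getD_eq_getElem?_getD, List.getElem?_set_ne (by omega),
          ← List.getD_eq_getElem?_getD]
      exact hz k (by omega) hk2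
    have hinv' : pvInv n paths (j + 1)
        ((PySem.List.pyGetD (pvBuildGraph n paths) j []).foldl (pvPush col) f)
        (PySem.List.pySetD r j col) := by
      intro k hk1 hk2 c
      rw [mem_pushFold _ (fun v hv => bucket_bounds hsh hj hjn hv) col f hf hk1 hk2,
          hinv k hk1 hk2 c, bucket_adj hsh hj hjn]
      have hgetj : (PySem.List.pySetD r j col).getD j.toNat 0 = col := by
        rw [hsetr, List.getD_eq_getElem?_getD, List.getElem?_set_self (by omega)]
        rfl
      have hgetne : ∀ jj : Int, 0 ≤ jj → jj < n → jj ≠ j →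
          (PySem.List.pySetD r j col).getD jj.toNat 0 = r.getD jj.toNat 0 := by
        intro jj h1 h2 h3
        rw [hsetr, List.getD_eq_getElem?_getD, List.getElem?_set_ne (by omega),
            ← List.getD_eq_getElem?_getD]
      constructor
      · rintro (⟨jj, h1, h2, hadj, hread⟩ | ⟨rfl, hadjk⟩)
        · refine ⟨jj, h1, by omega, hadj, ?_⟩
          rw [hgetne jj h1 (by omega) (by omega)]
          exact hread
        · exact ⟨j, hj, by omega, hadjk, hgetj⟩
      · rintro ⟨jj, h1, h2, hadj, hread⟩
        by_cases hjj : jj = j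
        · subst hjj
          rw [hgetj] at hread
          exact Or.inr ⟨hread.symm, hadj⟩
        · refine Or.inl ⟨jj, h1, by omega, hadj, ?_⟩
          rw [← hgetne jj h1 (by omega) hjj]
          exact hread
    have := ih (j + 1) (PySem.List.pySetD r j col)
        ((PySem.List.pyGetD (pvBuildGraph n paths) j []).foldl (pvPush col) f)
        (by omega) (by omega) hr' hf' hz' hinv'
    rw [this,
        show pvStepB (pvBuildGraph n paths) (f, r) j =
          ((PySem.List.pyGetD (pvBuildGraph n paths) j []).foldl (pvPush col) f,
           PySem.List.pySetD r j col) from rfl]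

-- ===== VERDICT (by name: the statement is the Claim_ definition above) =====
theorem gardenNoAdj_spec : Claim_equal_gardenNoAdj := by
  intro n paths _hdom hpre
  unfold Spec_gardenNoAdj gardenNoAdj gardenNoAdj_alt
  have hsh : ∀ p ∈ paths, ∃ x y, p = [x, y] ∧ -n < x ∧ x ≤ n ∧ -n < y ∧ y ≤ n :=
    fun p hp => pre_shape hpre hp
  by_cases hn : 0 ≤ n
  · apply loop_eq paths hsh (n - 0).toNat 0 _ _ le_rfl rfl (by simp; omega) (by simp; omega)
    · intro k hk1 hk2
      rw [List.getD_eq_getElem?_getD, List.getElem?_replicate]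
      split <;> rfl
    · intro k hk1 hk2 c
      rw [pyGetD_emod _ _ _ (by simp; omega) (by simp; omega)]
      rw [List.getD_eq_getElem?_getD, List.getElem?_replicate]
      constructor
      · intro h
        split at h <;> simp [PySem.Set.empty] at h
      · rintro ⟨j, h1, h2, -⟩
        omega
  · rw [PySem.List.pyRange_one_eq_nil (by omega)]
    rfl
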